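-- pv_equiv track=rewrite | github.com/INF1007-2022A/chapitre-05-3-malamao | exercice.py | format_horizontal_histogram
-- ===== SOURCE A (Python) =====
-- def format_horizontal_histogram(histogram):
-- 	BLOCK_CHAR = "|"
-- 	LINE_CHAR = "¯"
-- 	histo = ""
-- 	for i in range(max(histogram), 0, -1):
-- 		for n in range(1, len(histogram)):
-- 			if (i <= histogram[n]):
-- 				histo += BLOCK_CHAR
-- 			else:
-- 				histo += " "
-- 		histo += "\n"
-- 	histo += LINE_CHAR * len(histogram)
-- 	return histo
-- ===== SOURCE B (Python) =====
-- def format_horizontal_histogram(histogram):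
--     height = max(max(histogram), 0)
--     bars = []
--     for h in histogram[1:]:
--         blocks = max(h, 0)
--         bars.append(" " * (height - blocks) + "|" * blocks)
--     rows = ["".join(bar[r] for bar in bars) + "\n" for r in range(height)]
--     return "".join(rows) + "\u00af" * len(histogram)
-- ===== Notes on version B (the rewrite author's own statement) =====
-- stated objective: alternative
-- what changed: B precomputes one vertical bar string per column (spaces on top, '|' below) and generates the max-height many output rows by reading the r-th cell of each bar, instead of A's row-major double loop that compares each level against each column height.
-- outside the precondition, e.g. on format_horizontal_histogram([]): A raises ValueError, B raises ValueError
import Mathlib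
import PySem

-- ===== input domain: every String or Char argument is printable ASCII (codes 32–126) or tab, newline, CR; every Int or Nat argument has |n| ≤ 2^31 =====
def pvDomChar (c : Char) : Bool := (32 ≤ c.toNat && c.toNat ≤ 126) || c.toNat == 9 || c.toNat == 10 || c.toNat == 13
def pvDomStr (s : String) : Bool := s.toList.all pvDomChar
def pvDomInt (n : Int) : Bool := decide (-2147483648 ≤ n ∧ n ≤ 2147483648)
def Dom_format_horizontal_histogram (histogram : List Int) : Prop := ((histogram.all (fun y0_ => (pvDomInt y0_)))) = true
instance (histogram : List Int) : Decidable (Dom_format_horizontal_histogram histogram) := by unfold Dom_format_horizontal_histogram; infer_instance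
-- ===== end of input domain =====

-- B builds one vertical bar string per column and emits max-height many rows from them,
-- instead of A's row-major double loop with a per-cell comparison (alternative decomposition, same cost).

-- ===== PORT A =====
def format_horizontal_histogram (histogram : List Int) : String :=
  match PySem.List.max? histogram (fun x => x) with
  | none => ""   -- max([]) raises ValueError; excluded by Pre_
  | some m =>
    let histo : List Char :=
      (PySem.List.pyRange m 0 (-1)).foldl (fun histo i =>
        ((PySem.List.pyRange 1 (histogram.length : Int) 1).foldl (fun h n =>
          if i ≤ PySem.List.pyGetD histogram n 0 then h ++ ['|'] else h ++ [' ']) histo) ++ ['\n']) []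
    String.mk (histo ++ List.replicate histogram.length '¯')

-- ===== PORT B =====
def format_horizontal_histogram_alt (histogram : List Int) : String :=
  match PySem.List.max? histogram (fun x => x) with
  | none => ""   -- max([]) raises ValueError; excluded by Pre_
  | some m =>
    let height := (max m 0).toNat
    let bars : List (List Char) := histogram.tail.map (fun h =>
      List.replicate (height - (max h 0).toNat) ' ' ++ List.replicate ((max h 0).toNat) '|')
    let rows := (List.range height).map (fun r => bars.map (fun bar => bar.getD r ' ') ++ ['\n'])
    String.mk (rows.flatten ++ List.replicate histogram.length '¯')

-- ===== PRECONDITION & SPEC =====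
-- Pre_ excludes only the empty list, on which Python's max([]) raises ValueError (in A and in B alike).
def Pre_format_horizontal_histogram (histogram : List Int) : Prop := histogram ≠ []
instance (histogram : List Int) : Decidable (Pre_format_horizontal_histogram histogram) := by unfold Pre_format_horizontal_histogram; infer_instance
def pvWitness_format_horizontal_histogram : List Int := [3, 2, 0]

def Spec_format_horizontal_histogram (histogram : List Int) (out : String) : Prop := out = format_horizontal_histogram_alt histogram
instance (histogram : List Int) (out : String) : Decidable (Spec_format_horizontal_histogram histogram out) := by unfold Spec_format_horizontal_histogram; infer_instance

-- ===== CLAIM (what is proved, stated in full; the proofs are below) =====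
def Claim_equal_format_horizontal_histogram : Prop := ∀ (histogram : List Int), Dom_format_horizontal_histogram histogram → Pre_format_horizontal_histogram histogram → Spec_format_horizontal_histogram histogram (format_horizontal_histogram histogram)

-- ===== LEMMAS AND PROOFS =====

-- one cell of a bar string: '|' exactly when the row level m - k is at most the column height h
lemma pv_bar_getD (m h : Int) (k : Nat) (hk : k < m.toNat) (hh : h ≤ m) :
    (List.replicate ((max m 0).toNat - (max h 0).toNat) ' ' ++
      List.replicate ((max h 0).toNat) '|').getD k ' '
    = if m - (k : Int) ≤ h then '|' else ' ' := by
  rw [List.getD_eq_getElem?_getD]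
  by_cases hc : k < (max m 0).toNat - (max h 0).toNat
  · rw [List.getElem?_append_left (by simpa using hc), List.getElem?_replicate]
    rw [if_pos hc, if_neg (by omega)]
    rfl
  · rw [List.getElem?_append_right (by simp; omega), List.getElem?_replicate,
      if_pos (by simp; omega), if_pos (by omega)]
    rfl

-- one output row of A equals one output row of B
lemma pv_row_eq (histogram : List Int) (m : Int)
    (hmax : ∀ y ∈ histogram, y ≤ m) (k : Nat) (hk : k < m.toNat) :
    (PySem.List.pyRange 1 (histogram.length : Int) 1).map
      (fun n => if m - (k : Int) ≤ PySem.List.pyGetD histogram n 0 then '|' else ' ')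
    = (histogram.tail.map (fun h =>
        List.replicate ((max m 0).toNat - (max h 0).toNat) ' ' ++
          List.replicate ((max h 0).toNat) '|')).map (fun bar => bar.getD k ' ') := by
  have h1 : (PySem.List.pyRange 1 (histogram.length : Int) 1).map
      (fun n => if m - (k : Int) ≤ PySem.List.pyGetD histogram n 0 then '|' else ' ')
    = ((PySem.List.pyRange 1 (histogram.length : Int) 1).map
        (fun j => PySem.List.pyGetD histogram j 0)).map
        (fun v => if m - (k : Int) ≤ v then '|' else ' ') := by
    rw [List.map_map]; rfl
  rw [h1, PySem.List.map_pyGetD_pyRange' histogram 0 (by norm_num), List.map_map,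
    ← List.drop_one]
  exact List.map_congr_left (fun h hmem => by
    exact (pv_bar_getD m h k hk (hmax h (List.mem_of_mem_drop hmem))).symm)

lemma pv_main (histogram : List Int) (m : Int)
    (hm : PySem.List.max? histogram (fun x => x) = some m) :
    format_horizontal_histogram histogram = format_horizontal_histogram_alt histogram := by
  have hmax := PySem.List.max?_isMax hm
  unfold format_horizontal_histogram format_horizontal_histogram_alt
  rw [hm]
  simp only []
  congr 1
  congr 1
  -- A side: normalize the double fold into a flatMap of rows
  have hinner : ∀ (acc : List Char), ∀ i ∈ PySem.List.pyRange m 0 (-1),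
      ((PySem.List.pyRange 1 (histogram.length : Int) 1).foldl (fun h n =>
          if i ≤ PySem.List.pyGetD histogram n 0 then h ++ ['|'] else h ++ [' ']) acc) ++ ['\n']
      = acc ++ ((PySem.List.pyRange 1 (histogram.length : Int) 1).map
          (fun n => if i ≤ PySem.List.pyGetD histogram n 0 then '|' else ' ') ++ ['\n']) := by
    intro acc i _
    rw [PySem.List.foldl_congr_mem _ _
      (fun h n => h ++ [if i ≤ PySem.List.pyGetD histogram n 0 then '|' else ' ']) _
      (fun acc' n _ => by by_cases hc : i ≤ PySem.List.pyGetD histogram n 0 <;> simp [hc]),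
      PySem.List.foldl_append_singleton_eq_map, List.append_assoc]
  rw [PySem.List.foldl_congr_mem _ _ _ _ hinner,
    PySem.List.foldl_append_eq_flatMap, List.nil_append,
    PySem.List.pyRange_neg_one, List.flatMap_map]
  have hh : (max m 0).toNat = m.toNat := by omega
  rw [← List.flatMap_def, show List.range (max m 0).toNat = List.range m.toNat from by rw [hh]]
  simp only [Int.sub_zero]
  exact List.flatMap_congr (fun k hk => by
    rw [pv_row_eq histogram m hmax k (List.mem_range.mp hk)])

-- ===== VERDICT (by name: the statement is the Claim_ definition above) =====
theorem format_horizontal_histogram_spec : Claim_equal_format_horizontal_histogram := by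
  intro histogram _ hpre
  unfold Spec_format_horizontal_histogram
  cases hm : PySem.List.max? histogram (fun x => x) with
  | none => exact absurd ((PySem.List.max?_eq_none_iff _ _).mp hm) hpre
  | some m => exact pv_main histogram m hm
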